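-- pv_equiv track=rewrite | github.com/stevepryde/spnaughts | games/naughts/bots/naughtsbot.py | get_unrotated_move
-- ===== SOURCE A (Python) =====
-- def get_unrotated_move(move: int, rotations: int) -> int:
--     """
--     Return the correct, unrotated move.
--
--     The returned move corresponds to the move we would make on a board
--     rotated the specified number of times.
--     For example, if rotations is 1, and I want to get the corrected move
--     for move 0, this would return 6. If rotations is 2, and I want the
--     corrected move for 1, this would return 7.
--
--     :param move: The move to make.
--     :param rotations: The number of 90 degree rotations, in a clockwise
--         direction.
--     :returns: The move, rotated anti-clockwise by the number of specified
--         rotations.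
--     """
--     rotations = int(rotations) % 4
--
--     # Don't do anything if we don't have to.
--     if rotations == 0:
--         return int(move)
--
--     transform_map = [6, 3, 0, 7, 4, 1, 8, 5, 2]
--     for _ in range(rotations):
--         move = transform_map[int(move)]
--
--     return move
-- ===== SOURCE B (Python) =====
-- def get_unrotated_move(move: int, rotations: int) -> int:
--     """Un-rotate by the net closed-form transform for rotations % 4 (no loop)."""
--     rotations = int(rotations) % 4
--     move = int(move)
--     if rotations == 0:
--         return move
--     if rotations == 2:
--         # 180 degrees is the point reflection: index -> 8 - index.
--         return 8 - move
--     r, c = divmod(move, 3)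
--     if rotations == 1:
--         # one anticlockwise step: (r, c) -> (2 - c, r)
--         return 6 - 3 * c + r
--     # three anticlockwise steps = one clockwise step: (r, c) -> (c, 2 - r)
--     return 3 * c + 2 - r
-- ===== Notes on version B (the rewrite author's own statement) =====
-- stated objective: alternative
-- what changed: Removes the permutation table and the per-rotation loop entirely: B dispatches on rotations % 4 and returns the net transform in closed form (180 degrees is 8 - move; 90/270 degrees are single affine formulas on divmod(move, 3) coordinates).
-- intended difference: On negative in-range moves (-9 <= move <= -1) with rotations % 4 != 0, A returns the permutation value picked by Python's accidental negative-index wraparound (e.g. A(-1,1)=2), while B's closed-form arithmetic extends the rotation to the floor-division coordinates (B(-1,1)=-1); moves are board indices 0..8, so wraparound is an artefact and B's arithmetic value is the natural behaviour. — e.g. on get_unrotated_move(-1, 1): A returns 2, B returns -1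
import Mathlib
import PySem

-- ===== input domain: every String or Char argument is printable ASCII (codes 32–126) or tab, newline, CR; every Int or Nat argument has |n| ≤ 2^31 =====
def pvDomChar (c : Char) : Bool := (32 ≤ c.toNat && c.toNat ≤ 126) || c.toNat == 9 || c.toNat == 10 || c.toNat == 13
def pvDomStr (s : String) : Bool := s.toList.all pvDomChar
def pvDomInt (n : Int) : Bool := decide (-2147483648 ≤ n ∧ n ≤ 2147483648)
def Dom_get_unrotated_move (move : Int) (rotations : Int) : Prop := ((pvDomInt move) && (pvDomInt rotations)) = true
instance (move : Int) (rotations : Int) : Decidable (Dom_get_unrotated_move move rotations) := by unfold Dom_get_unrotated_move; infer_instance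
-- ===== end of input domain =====

-- B replaces A's permutation-table loop with a loop-free closed-form transform per rotations % 4 (alternative, same cost).

-- ===== PORT A =====
-- transform_map[int(move)]: pyGet? (negative index wraps, out of range = IndexError,
-- excluded by Pre_); .getD 0 is never reached under Pre_.
def get_unrotated_move (move : Int) (rotations : Int) : Int :=
  let rot := PySem.Int.mod rotations 4
  if rot = 0 then move
  else
    (PySem.List.pyRange 0 rot 1).foldl
      (fun m _ => (PySem.List.pyGet? ([6, 3, 0, 7, 4, 1, 8, 5, 2] : List Int) m).getD 0) move

-- ===== PORT B =====
def get_unrotated_move_alt (move : Int) (rotations : Int) : Int :=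
  let rot := PySem.Int.mod rotations 4
  if rot = 0 then move
  else if rot = 2 then 8 - move
  else
    let r := PySem.Int.floordiv move 3
    let c := PySem.Int.mod move 3
    if rot = 1 then 6 - 3 * c + r
    else 3 * c + 2 - r

-- ===== PRECONDITION & SPEC =====
-- Pre_ excludes exactly the inputs where A raises IndexError: rotations % 4 ≠ 0 with move outside -9..8.
def Pre_get_unrotated_move (move : Int) (rotations : Int) : Prop :=
  PySem.Int.mod rotations 4 = 0 ∨ (-9 ≤ move ∧ move ≤ 8)
instance (move : Int) (rotations : Int) : Decidable (Pre_get_unrotated_move move rotations) := by unfold Pre_get_unrotated_move; infer_instance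
def pvWitness_get_unrotated_move : Int × Int := (0, 1)

-- On negative in-range moves (-9 ≤ move ≤ -1) with rotations % 4 ≠ 0, A returns the permutation value
-- picked by Python's accidental negative-index wraparound (e.g. A(-1,1)=2), while B's closed-form
-- arithmetic extends the rotation to the floor-division coordinates (B(-1,1)=-1); moves are board
-- indices 0..8, so wraparound is an artefact and B's arithmetic value is the natural behaviour.
def D_get_unrotated_move (move : Int) (rotations : Int) : Prop :=
  ¬ PySem.Int.mod rotations 4 = 0 ∧ -9 ≤ move ∧ move ≤ -1
instance (move : Int) (rotations : Int) : Decidable (D_get_unrotated_move move rotations) := by unfold D_get_unrotated_move; infer_instance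

def Spec_get_unrotated_move (move : Int) (rotations : Int) (out : Int) : Prop :=
  ¬ D_get_unrotated_move move rotations → out = get_unrotated_move_alt move rotations
instance (move : Int) (rotations : Int) (out : Int) : Decidable (Spec_get_unrotated_move move rotations out) := by unfold Spec_get_unrotated_move; infer_instance

def pvDiffWitness_get_unrotated_move : Int × Int := (-1, 1)
def pvDiffWitnessOut_get_unrotated_move : Int × Int := (2, -1)

-- ===== CLAIM (what is proved, stated in full; the proofs are below) =====
def Claim_unchanged_get_unrotated_move : Prop := ∀ (move : Int) (rotations : Int), Dom_get_unrotated_move move rotations → Pre_get_unrotated_move move rotations → Spec_get_unrotated_move move rotations (get_unrotated_move move rotations)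
def Claim_changed_get_unrotated_move : Prop := Dom_get_unrotated_move (pvDiffWitness_get_unrotated_move.1) (pvDiffWitness_get_unrotated_move.2) ∧ Pre_get_unrotated_move (pvDiffWitness_get_unrotated_move.1) (pvDiffWitness_get_unrotated_move.2) ∧ D_get_unrotated_move (pvDiffWitness_get_unrotated_move.1) (pvDiffWitness_get_unrotated_move.2) ∧ get_unrotated_move (pvDiffWitness_get_unrotated_move.1) (pvDiffWitness_get_unrotated_move.2) = pvDiffWitnessOut_get_unrotated_move.1 ∧ get_unrotated_move_alt (pvDiffWitness_get_unrotated_move.1) (pvDiffWitness_get_unrotated_move.2) = pvDiffWitnessOut_get_unrotated_move.2 ∧ pvDiffWitnessOut_get_unrotated_move.1 ≠ pvDiffWitnessOut_get_unrotated_move.2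
def Claim_exact_get_unrotated_move : Prop := ∀ (move : Int) (rotations : Int), Dom_get_unrotated_move move rotations → Pre_get_unrotated_move move rotations → D_get_unrotated_move move rotations → get_unrotated_move move rotations ≠ get_unrotated_move_alt move rotations

-- ===== LEMMAS AND PROOFS =====

theorem mod4_cases (rotations : Int) :
    PySem.Int.mod rotations 4 = 0 ∨ PySem.Int.mod rotations 4 = 1 ∨
    PySem.Int.mod rotations 4 = 2 ∨ PySem.Int.mod rotations 4 = 3 := by
  rw [PySem.Int.mod_eq_emod_of_pos (by norm_num)]
  omega

-- ===== VERDICT (by name: the statement is the Claim_ definition above) =====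
theorem get_unrotated_move_spec : Claim_unchanged_get_unrotated_move := by
  intro move rotations _ hpre hnd
  rcases mod4_cases rotations with hr | hr | hr | hr
  · simp only [get_unrotated_move, get_unrotated_move_alt, hr]
    norm_num
  all_goals {
    have hm : 0 ≤ move ∧ move ≤ 8 := by
      unfold Pre_get_unrotated_move at hpre
      unfold D_get_unrotated_move at hnd
      rcases hpre with h | h
      · rw [hr] at h; norm_num at h
      · constructor
        · by_contra hneg
          exact hnd ⟨by rw [hr]; norm_num, h.1, by omega⟩
        · exact h.2
    obtain ⟨h0, h8⟩ := hm
    interval_cases move <;> simp only [get_unrotated_move, get_unrotated_move_alt, hr] <;> decide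
  }

theorem get_unrotated_move_changed : Claim_changed_get_unrotated_move := by
  unfold Claim_changed_get_unrotated_move; decide

theorem get_unrotated_move_tight : Claim_exact_get_unrotated_move := by
  intro move rotations _ _ hd
  unfold D_get_unrotated_move at hd
  obtain ⟨hne, h9, h1⟩ := hd
  rcases mod4_cases rotations with hr | hr | hr | hr
  · exact absurd hr hne
  all_goals {
    interval_cases move <;> simp only [get_unrotated_move, get_unrotated_move_alt, hr] <;> decide
  }
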